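-- pv_equiv track=rewrite | github.com/pypi-data/pypi-mirror-380 | packages/bb-mcp-server/bb_mcp_server-1.2.2.tar.gz/bb_mcp_server-1.2.2/src/modules/tools/tools.py | _build_reviewer_payload
-- ===== SOURCE A (Python) =====
-- from typing import Annotated, Any, Iterable, Literal, Optional, Sequence
--
-- def _build_reviewer_payload(reviewers: Sequence[str]) -> list[dict[str, str]]:
--     """Translate reviewer identifiers into Bitbucket payload objects."""
--
--     payload: list[dict[str, str]] = []
--     for reviewer in reviewers:
--         if not reviewer:
--             continue
--         value = reviewer.strip()
--         if not value:
--             continue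
--         if value.startswith("{") and value.endswith("}"):
--             payload.append({"uuid": value})
--             continue
--         if value.startswith("uuid:"):
--             payload.append({"uuid": value[5:].strip()})
--             continue
--         if value.startswith("account:"):
--             payload.append({"account_id": value[8:].strip()})
--             continue
--         if value.startswith("account_id:"):
--             payload.append({"account_id": value[11:].strip()})
--             continue
--         if value.startswith("nickname:"):
--             payload.append({"nickname": value[9:].strip()})
--             continue
--         payload.append({"nickname": value})
--
--     return payload
-- ===== SOURCE B (Python) =====
-- _KEY_MAP = {
--     "uuid": "uuid",
--     "account": "account_id",
--     "account_id": "account_id",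
--     "nickname": "nickname",
-- }
--
--
-- def _classify(value):
--     if value.startswith("{") and value.endswith("}"):
--         return {"uuid": value}
--     head, sep, tail = value.partition(":")
--     if sep and head in _KEY_MAP:
--         return {_KEY_MAP[head]: tail.strip()}
--     return {"nickname": value}
--
--
-- def _build_reviewer_payload(reviewers):
--     """Translate reviewer identifiers into Bitbucket payload objects."""
--     return [_classify(v.strip()) for v in reviewers if v and v.strip()]
-- ===== Notes on version B (the rewrite author's own statement) =====
-- stated objective: alternative
-- what changed: Instead of A's ordered chain of startswith checks (where 'account:' must be tested before 'account_id:'), B partitions each value at its first ':' and dispatches on the segment before it via a key-map lookup, with the brace case as a pre-check and nickname as the fallback; the loop becomes a filter+map over this classifier.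
import Mathlib
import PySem

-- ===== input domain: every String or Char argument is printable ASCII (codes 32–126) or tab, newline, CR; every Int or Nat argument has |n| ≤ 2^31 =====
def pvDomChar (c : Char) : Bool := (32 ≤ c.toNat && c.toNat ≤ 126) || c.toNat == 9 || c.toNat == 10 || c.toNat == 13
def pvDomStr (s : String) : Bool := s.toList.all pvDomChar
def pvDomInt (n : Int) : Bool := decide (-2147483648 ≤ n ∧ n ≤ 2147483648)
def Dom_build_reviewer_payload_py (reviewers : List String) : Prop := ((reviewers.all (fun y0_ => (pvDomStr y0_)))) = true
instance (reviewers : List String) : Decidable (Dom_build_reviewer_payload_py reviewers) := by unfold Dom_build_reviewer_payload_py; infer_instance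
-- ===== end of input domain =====

set_option maxRecDepth 8000

-- B replaces A's ordered startswith-chain with parse-then-dispatch: partition the value at its
-- first ':' and look the segment before it up in a key map (objective: alternative); same return value.


-- ===== PORT A =====
def build_reviewer_payload_py (reviewers : List String) : List (List (String × String)) :=
  reviewers.foldl (fun payload reviewer =>
    if reviewer = "" then payload
    else
      let value := PySem.Str.strip reviewer
      if value = "" then payload
      else if PySem.Str.startswith value "{" && PySem.Str.endswith value "}" then
        payload ++ [[("uuid", value)]]
      else if PySem.Str.startswith value "uuid:" then
        payload ++ [[("uuid", PySem.Str.strip (PySem.Str.slice value (some 5) none))]]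
      else if PySem.Str.startswith value "account:" then
        payload ++ [[("account_id", PySem.Str.strip (PySem.Str.slice value (some 8) none))]]
      else if PySem.Str.startswith value "account_id:" then
        payload ++ [[("account_id", PySem.Str.strip (PySem.Str.slice value (some 11) none))]]
      else if PySem.Str.startswith value "nickname:" then
        payload ++ [[("nickname", PySem.Str.strip (PySem.Str.slice value (some 9) none))]]
      else payload ++ [[("nickname", value)]]) []

-- ===== PORT B =====
-- B: split the value at its FIRST ':' and dispatch on the segment via a key map; no ordered prefix chain.
def pvKeyMap : PySem.Dict String String :=
  ⟨[("uuid", "uuid"), ("account", "account_id"), ("account_id", "account_id"), ("nickname", "nickname")]⟩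

-- hand port of value.partition(":") (exact: CPython partition splits at the first occurrence,
-- located here by str.find; returns (head, tail, found))
def pvPartitionColon (s : String) : String × String × Bool :=
  let i := PySem.Str.find s ":"
  if i = -1 then (s, "", false)
  else (PySem.Str.slice s none (some i), PySem.Str.slice s (some (i + 1)) none, true)

def pvClassify (value : String) : List (String × String) :=
  if PySem.Str.startswith value "{" && PySem.Str.endswith value "}" then [("uuid", value)]
  else
    let p := pvPartitionColon value
    if p.2.2 then
      match PySem.Dict.get? pvKeyMap p.1 with
      | some key => [(key, PySem.Str.strip p.2.1)]
      | none => [("nickname", value)]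
    else [("nickname", value)]

def build_reviewer_payload_py_alt (reviewers : List String) : List (List (String × String)) :=
  (reviewers.filter (fun v => v ≠ "" && PySem.Str.strip v ≠ "")).map
    (fun v => pvClassify (PySem.Str.strip v))

-- ===== PRECONDITION & SPEC =====
def Spec_build_reviewer_payload_py (reviewers : List String) (out : List (List (String × String))) : Prop := out = build_reviewer_payload_py_alt reviewers
instance (reviewers : List String) (out : List (List (String × String))) : Decidable (Spec_build_reviewer_payload_py reviewers out) := by unfold Spec_build_reviewer_payload_py; infer_instance

-- ===== CLAIM (what is proved, stated in full; the proofs are below) =====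
def Claim_equal_build_reviewer_payload_py : Prop := ∀ (reviewers : List String), Dom_build_reviewer_payload_py reviewers → Spec_build_reviewer_payload_py reviewers (build_reviewer_payload_py reviewers)

-- ===== LEMMAS AND PROOFS =====
lemma prefix_colon {p h t : List Char} (hp : ∀ c ∈ p, c ≠ ':') (hh : ∀ c ∈ h, c ≠ ':') :
    (p ++ [':']) <+: (h ++ ':' :: t) ↔ p = h := by
  induction p generalizing h with
  | nil =>
    cases h with
    | nil => simp
    | cons c h' =>
      have hc : c ≠ ':' := hh c (by simp)
      simp only [List.nil_append, List.cons_append, List.cons_prefix_cons]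
      constructor
      · rintro ⟨h1, -⟩; exact absurd h1.symm hc
      · intro h1; simp at h1
  | cons a p' ih =>
    cases h with
    | nil =>
      have ha : a ≠ ':' := hp a (by simp)
      simp only [List.cons_append, List.nil_append, List.cons_prefix_cons]
      constructor
      · rintro ⟨h1, -⟩; exact absurd h1 ha
      · intro h1; simp at h1
    | cons c h' =>
      have ih' := ih (fun x hx => hp x (List.mem_cons_of_mem _ hx))
        (fun x hx => hh x (List.mem_cons_of_mem _ hx))
      simp only [List.cons_append, List.cons_prefix_cons, ih', List.cons.injEq]

lemma find_colon_split (cs : List Char) (hin : [':'] <:+: cs) :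
    ∃ (n : Nat) (t : List Char), PySem.Chars.find cs [':'] = (n : Int) ∧ n ≤ cs.length ∧
      cs = cs.take n ++ ':' :: t ∧ (∀ c ∈ cs.take n, c ≠ ':') := by
  have hne0 : PySem.Chars.find cs [':'] ≠ -1 := (PySem.Chars.find_ne_neg_one_iff cs [':']).mpr hin
  have hm1 : -1 ≤ PySem.Chars.find cs [':'] := PySem.Chars.neg_one_le_find cs [':']
  have h0 : 0 ≤ PySem.Chars.find cs [':'] := by omega
  obtain ⟨hpre, hmin⟩ := PySem.Chars.find_spec (s := cs) (sub := [':']) h0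
  have hfind : PySem.Chars.find cs [':'] = ((PySem.Chars.find cs [':']).toNat : Int) :=
    (Int.toNat_of_nonneg h0).symm
  have hlen := PySem.Chars.find_le_length (s := cs) (sub := [':'])
  refine ⟨(PySem.Chars.find cs [':']).toNat, ?_⟩
  obtain ⟨t, ht⟩ := hpre
  refine ⟨t, hfind, by omega, ?_, ?_⟩
  · conv_lhs => rw [← List.take_append_drop (PySem.Chars.find cs [':']).toNat cs]
    rw [← ht]
    simp
  · intro c hc hcolon
    subst hcolon
    obtain ⟨j, hj, hget⟩ := List.mem_iff_getElem.mp hc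
    have hjn : j < (PySem.Chars.find cs [':']).toNat := by
      simp only [List.length_take] at hj; omega
    have hjcs : j < cs.length := by
      simp only [List.length_take] at hj; omega
    have hgj : cs[j] = ':' := by
      rw [← hget]
      exact (List.getElem_take).symm
    exact hmin j hjn ⟨cs.drop (j + 1), by
      rw [List.singleton_append, ← hgj]
      exact (List.getElem_cons_drop hjcs)⟩

lemma classify_eq (value : String) :
    (if PySem.Str.startswith value "{" && PySem.Str.endswith value "}" then [("uuid", value)]
     else if PySem.Str.startswith value "uuid:" then
       [("uuid", PySem.Str.strip (PySem.Str.slice value (some 5) none))]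
     else if PySem.Str.startswith value "account:" then
       [("account_id", PySem.Str.strip (PySem.Str.slice value (some 8) none))]
     else if PySem.Str.startswith value "account_id:" then
       [("account_id", PySem.Str.strip (PySem.Str.slice value (some 11) none))]
     else if PySem.Str.startswith value "nickname:" then
       [("nickname", PySem.Str.strip (PySem.Str.slice value (some 9) none))]
     else [("nickname", value)]) = pvClassify value := by
  by_cases hbr : PySem.Chars.startswith value.toList ['{'] = true ∧
      PySem.Chars.endswith value.toList ['}'] = true
  · simp [pvClassify, hbr]
  · by_cases hin : [':'] <:+: value.toList
    · obtain ⟨n, t, hfind, hle, hsplit, hfree⟩ := find_colon_split value.toList hin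
      have hnne : ¬ (((n : Nat) : Int) = -1) := by omega
      have swchar : ∀ (pre full : String), full.toList = pre.toList ++ [':'] →
          (∀ c ∈ pre.toList, c ≠ ':') →
          (PySem.Str.startswith value full = true ↔ value.toList.take n = pre.toList) := by
        intro pre full hfull hpre
        rw [PySem.Str.startswith_eq, PySem.Chars.startswith_iff, hfull]
        constructor
        · intro h
          rw [hsplit] at h
          exact ((prefix_colon hpre hfree).mp h).symm
        · intro h
          rw [hsplit]
          exact (prefix_colon hpre hfree).mpr h.symm
      have su := swchar "uuid" "uuid:" (by rfl) (by simp)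
      have sa := swchar "account" "account:" (by rfl) (by simp)
      have sai := swchar "account_id" "account_id:" (by rfl) (by simp)
      have sn := swchar "nickname" "nickname:" (by rfl) (by simp)
      have hheadL : (PySem.Str.slice value none (some ((n : Nat) : Int))).toList
          = value.toList.take n := by
        simp [PySem.List.slice_to_natCast]
      have hlenTake : (value.toList.take n).length = n := by
        simp only [List.length_take]; omega
      by_cases e1 : value.toList.take n = "uuid".toList
      · have hsw := su.mpr e1
        have hn4 : n = 4 := by
          have := congrArg List.length e1
          rw [hlenTake] at this
          simpa using this
        have hhead : PySem.Str.slice value none (some ((n : Nat) : Int)) = "uuid" :=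
          String.toList_inj.mp (by rw [hheadL, e1])
        have hget : PySem.Dict.get? pvKeyMap "uuid" = some "uuid" := by rfl
        have h5 : ((n : Nat) : Int) + 1 = (5 : Int) := by subst hn4; norm_num
        simp at hsw
        simp [pvClassify, pvPartitionColon, hbr, hsw, hfind, hnne, hhead, hget, h5]
      · have h1 : PySem.Str.startswith value "uuid:" = false := by
          rw [Bool.eq_false_iff]; exact fun h => e1 (su.mp h)
        simp at h1
        by_cases e2 : value.toList.take n = "account".toList
        · have hsw := sa.mpr e2
          have hn7 : n = 7 := by
            have := congrArg List.length e2
            rw [hlenTake] at this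
            simpa using this
          have hhead : PySem.Str.slice value none (some ((n : Nat) : Int)) = "account" :=
            String.toList_inj.mp (by rw [hheadL, e2])
          have hget : PySem.Dict.get? pvKeyMap "account" = some "account_id" := by rfl
          have h8 : ((n : Nat) : Int) + 1 = (8 : Int) := by subst hn7; norm_num
          simp at hsw
          simp [pvClassify, pvPartitionColon, hbr, h1, hsw, hfind, hnne, hhead, hget, h8]
        · have h2 : PySem.Str.startswith value "account:" = false := by
            rw [Bool.eq_false_iff]; exact fun h => e2 (sa.mp h)
          simp at h2
          by_cases e3 : value.toList.take n = "account_id".toList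
          · have hsw := sai.mpr e3
            have hn10 : n = 10 := by
              have := congrArg List.length e3
              rw [hlenTake] at this
              simpa using this
            have hhead : PySem.Str.slice value none (some ((n : Nat) : Int)) = "account_id" :=
              String.toList_inj.mp (by rw [hheadL, e3])
            have hget : PySem.Dict.get? pvKeyMap "account_id" = some "account_id" := by rfl
            have h11 : ((n : Nat) : Int) + 1 = (11 : Int) := by subst hn10; norm_num
            simp at hsw
            simp [pvClassify, pvPartitionColon, hbr, h1, h2, hsw, hfind, hnne, hhead, hget, h11]
          · have h3 : PySem.Str.startswith value "account_id:" = false := by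
              rw [Bool.eq_false_iff]; exact fun h => e3 (sai.mp h)
            simp at h3
            by_cases e4 : value.toList.take n = "nickname".toList
            · have hsw := sn.mpr e4
              have hn8 : n = 8 := by
                have := congrArg List.length e4
                rw [hlenTake] at this
                simpa using this
              have hhead : PySem.Str.slice value none (some ((n : Nat) : Int)) = "nickname" :=
                String.toList_inj.mp (by rw [hheadL, e4])
              have hget : PySem.Dict.get? pvKeyMap "nickname" = some "nickname" := by rfl
              have h9 : ((n : Nat) : Int) + 1 = (9 : Int) := by subst hn8; norm_num
              simp at hsw
              simp [pvClassify, pvPartitionColon, hbr, h1, h2, h3, hsw, hfind, hnne, hhead,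
                hget, h9]
            · have h4 : PySem.Str.startswith value "nickname:" = false := by
                rw [Bool.eq_false_iff]; exact fun h => e4 (sn.mp h)
              simp at h4
              have hne1 : PySem.Str.slice value none (some ((n : Nat) : Int)) ≠ "uuid" :=
                fun h => e1 (by rw [← hheadL]; exact congrArg String.toList h)
              have hne2 : PySem.Str.slice value none (some ((n : Nat) : Int)) ≠ "account" :=
                fun h => e2 (by rw [← hheadL]; exact congrArg String.toList h)
              have hne3 : PySem.Str.slice value none (some ((n : Nat) : Int)) ≠ "account_id" :=
                fun h => e3 (by rw [← hheadL]; exact congrArg String.toList h)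
              have hne4 : PySem.Str.slice value none (some ((n : Nat) : Int)) ≠ "nickname" :=
                fun h => e4 (by rw [← hheadL]; exact congrArg String.toList h)
              have hfindn : List.find? (fun p => p.1 ==
                  PySem.Str.slice value none (some ((n : Nat) : Int))) pvKeyMap.items = none := by
                rw [List.find?_eq_none]
                intro x hx
                have hx' : x = ("uuid", "uuid") ∨ x = ("account", "account_id") ∨
                    x = ("account_id", "account_id") ∨ x = ("nickname", "nickname") := by
                  simpa [pvKeyMap] using hx
                rcases hx' with h | h | h | h <;> subst h <;> simp only [beq_iff_eq]
                · exact Ne.symm hne1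
                · exact Ne.symm hne2
                · exact Ne.symm hne3
                · exact Ne.symm hne4
              have hgetn : PySem.Dict.get? pvKeyMap
                  (PySem.Str.slice value none (some ((n : Nat) : Int))) = none := by
                simp [PySem.Dict.get?, hfindn]
              simp [pvClassify, pvPartitionColon, hbr, h1, h2, h3, h4, hfind, hnne, hgetn]
    · have hfindneg : PySem.Chars.find value.toList [':'] = -1 :=
        (PySem.Chars.find_eq_neg_one_iff value.toList [':']).mpr hin
      have nsw : ∀ (full : String), [':'] <:+: full.toList →
          PySem.Str.startswith value full = false := by
        intro full hc
        rw [Bool.eq_false_iff]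
        intro h
        rw [PySem.Str.startswith_eq, PySem.Chars.startswith_iff] at h
        exact hin (hc.trans h.isInfix)
      have h1 := nsw "uuid:" (by decide)
      have h2 := nsw "account:" (by decide)
      have h3 := nsw "account_id:" (by decide)
      have h4 := nsw "nickname:" (by decide)
      simp at h1 h2 h3 h4
      simp [pvClassify, pvPartitionColon, hbr, h1, h2, h3, h4, hfindneg]

lemma step_eq (payload : List (List (String × String))) (reviewer : String) :
    (if reviewer = "" then payload
     else
       let value := PySem.Str.strip reviewer
       if value = "" then payload
       else if PySem.Str.startswith value "{" && PySem.Str.endswith value "}" then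
         payload ++ [[("uuid", value)]]
       else if PySem.Str.startswith value "uuid:" then
         payload ++ [[("uuid", PySem.Str.strip (PySem.Str.slice value (some 5) none))]]
       else if PySem.Str.startswith value "account:" then
         payload ++ [[("account_id", PySem.Str.strip (PySem.Str.slice value (some 8) none))]]
       else if PySem.Str.startswith value "account_id:" then
         payload ++ [[("account_id", PySem.Str.strip (PySem.Str.slice value (some 11) none))]]
       else if PySem.Str.startswith value "nickname:" then
         payload ++ [[("nickname", PySem.Str.strip (PySem.Str.slice value (some 9) none))]]
       else payload ++ [[("nickname", value)]])
    = if reviewer = "" ∨ PySem.Str.strip reviewer = "" then payload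
      else payload ++ [pvClassify (PySem.Str.strip reviewer)] := by
  rw [← classify_eq (PySem.Str.strip reviewer)]
  by_cases h1 : reviewer = ""
  · simp [h1]
  by_cases h2 : PySem.Str.strip reviewer = ""
  · simp [h1, h2]
  simp [h1, h2]
  split_ifs <;> rfl

lemma foldl_eq (reviewers : List String) (acc : List (List (String × String))) :
    reviewers.foldl (fun payload reviewer =>
      if reviewer = "" then payload
      else
        let value := PySem.Str.strip reviewer
        if value = "" then payload
        else if PySem.Str.startswith value "{" && PySem.Str.endswith value "}" then
          payload ++ [[("uuid", value)]]
        else if PySem.Str.startswith value "uuid:" then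
          payload ++ [[("uuid", PySem.Str.strip (PySem.Str.slice value (some 5) none))]]
        else if PySem.Str.startswith value "account:" then
          payload ++ [[("account_id", PySem.Str.strip (PySem.Str.slice value (some 8) none))]]
        else if PySem.Str.startswith value "account_id:" then
          payload ++ [[("account_id", PySem.Str.strip (PySem.Str.slice value (some 11) none))]]
        else if PySem.Str.startswith value "nickname:" then
          payload ++ [[("nickname", PySem.Str.strip (PySem.Str.slice value (some 9) none))]]
        else payload ++ [[("nickname", value)]]) acc
    = acc ++ build_reviewer_payload_py_alt reviewers := by
  induction reviewers generalizing acc with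
  | nil => simp [build_reviewer_payload_py_alt]
  | cons v l ih =>
      rw [List.foldl_cons, step_eq, ih]
      by_cases h1 : v = "" <;> by_cases h2 : PySem.Str.strip v = "" <;>
        simp [build_reviewer_payload_py_alt, h1, h2]

-- ===== VERDICT (by name: the statement is the Claim_ definition above) =====
theorem build_reviewer_payload_py_spec : Claim_equal_build_reviewer_payload_py := by
  intro reviewers _
  unfold Spec_build_reviewer_payload_py build_reviewer_payload_py
  rw [foldl_eq]
  simp
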